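-- pv_equiv track=rewrite | github.com/CaDaGo/UaRo | data/texture/lgp/plugin_editor.py | rebuild_ini
-- ===== SOURCE A (Python) =====
-- def rebuild_ini(lines, skills):
--     new_lines = []
--     section = None
--     i = 0
--     n = len(lines)
--     skill_ids = sorted(skills.keys())
--
--     while i < n:
--         line = lines[i]
--         stripped = line.strip()
--
--         if stripped.startswith("[") and stripped.endswith("]"):
--             section = stripped[1:-1]
--
--             if section == "LGP::CELL_IMAGE":
--                 new_lines.append(line)
--                 i += 1
--                 while i < n:
--                     t = lines[i].strip()
--                     if t.startswith("[") and t.endswith("]"):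
--                         break
--                     i += 1
--
--                 for sid in skill_ids:
--                     data = skills[sid]
--                     if data["comment"]:
--                         new_lines.append(data["comment"])
--                     new_lines.append(f"{sid} = {data['image']}")
--                     new_lines.append("")
--                 continue
--
--             if section == "LGP::CELL_COLOR":
--                 new_lines.append(line)
--                 i += 1
--                 while i < n:
--                     t = lines[i].strip()
--                     if t.startswith("[") and t.endswith("]"):
--                         break
--                     i += 1
--
--                 for sid in skill_ids:
--                     data = skills[sid]
--                     if data["color"]:
--                         if data["comment"]:
--                             new_lines.append(data["comment"])
--                         new_lines.append(f"{sid}={data['color']}")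
--                         new_lines.append("")
--                 continue
--
--         new_lines.append(line)
--         i += 1
--
--     return "\n".join(new_lines) + "\n"
-- ===== SOURCE B (Python) =====
-- def rebuild_ini(lines, skills):
--     skill_ids = sorted(skills.keys())
--
--     def is_header(l):
--         t = l.strip()
--         return t.startswith("[") and t.endswith("]")
--
--     def image_lines():
--         out = []
--         for sid in skill_ids:
--             data = skills[sid]
--             if data["comment"]:
--                 out.append(data["comment"])
--             out.append(f"{sid} = {data['image']}")
--             out.append("")
--         return out
--
--     def color_lines():
--         out = []
--         for sid in skill_ids:
--             data = skills[sid]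
--             if data["color"]:
--                 if data["comment"]:
--                     out.append(data["comment"])
--                 out.append(f"{sid}={data['color']}")
--                 out.append("")
--         return out
--
--     # phase 1: split into a preamble and (header_line, name, body_lines) groups
--     preamble = []
--     k = 0
--     while k < len(lines) and not is_header(lines[k]):
--         preamble.append(lines[k])
--         k += 1
--     groups = []
--     while k < len(lines):
--         header = lines[k]
--         name = header.strip()[1:-1]
--         k += 1
--         body = []
--         while k < len(lines) and not is_header(lines[k]):
--             body.append(lines[k])
--             k += 1
--         groups.append((header, name, body))
--
--     # phase 2: assemble
--     new_lines = list(preamble)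
--     for header, name, body in groups:
--         new_lines.append(header)
--         if name == "LGP::CELL_IMAGE":
--             new_lines.extend(image_lines())
--         elif name == "LGP::CELL_COLOR":
--             new_lines.extend(color_lines())
--         else:
--             new_lines.extend(body)
--     return "\n".join(new_lines) + "\n"
-- ===== Notes on version B (the rewrite author's own statement) =====
-- stated objective: alternative
-- what changed: A's single index-driven while loop with an inner body-skipping while is replaced by a two-phase pass: first split the lines into a preamble plus (header, name, body) groups, then assemble the output from the groups, substituting the sorted-skill lines for the two special sections.
import Mathlib
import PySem

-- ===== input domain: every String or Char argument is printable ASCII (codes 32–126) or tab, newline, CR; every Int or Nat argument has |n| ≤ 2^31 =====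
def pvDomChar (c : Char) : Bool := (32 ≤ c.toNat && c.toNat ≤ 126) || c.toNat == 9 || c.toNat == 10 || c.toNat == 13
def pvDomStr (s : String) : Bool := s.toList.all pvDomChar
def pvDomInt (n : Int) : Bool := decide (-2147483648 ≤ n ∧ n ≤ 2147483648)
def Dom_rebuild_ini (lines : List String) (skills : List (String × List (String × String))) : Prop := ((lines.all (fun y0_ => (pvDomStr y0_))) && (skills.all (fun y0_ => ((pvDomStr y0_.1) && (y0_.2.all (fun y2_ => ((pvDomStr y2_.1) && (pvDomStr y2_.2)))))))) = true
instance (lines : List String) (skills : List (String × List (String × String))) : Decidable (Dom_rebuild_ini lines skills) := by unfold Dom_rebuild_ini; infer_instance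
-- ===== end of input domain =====

-- B re-decomposes A's single index-driven while loop into two phases (split into preamble +
-- (header, name, body) groups, then assemble); same return value, objective: alternative.

-- shared one-line predicate: line.strip() is of the form "[...]"
def pvIsHeader (l : String) : Bool :=
  PySem.Str.startswith (PySem.Str.strip l) "[" && PySem.Str.endswith (PySem.Str.strip l) "]"

-- ===== PORT A =====
-- A's outer while over the remaining lines; the inner `while` that skips a replaced
-- section's body is `dropWhile (not header)`; `new_lines` is the accumulator `acc`.
def rebuild_ini_loopA (ids : List String) (d : PySem.Dict String (List (String × String))) :
    List String → List String → List String
  | [], acc => acc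
  | line :: tl, acc =>
    let stripped := PySem.Str.strip line
    if PySem.Str.startswith stripped "[" && PySem.Str.endswith stripped "]" then
      let sec := PySem.Str.slice stripped (some 1) (some (-1))
      if sec == "LGP::CELL_IMAGE" then
        rebuild_ini_loopA ids d (tl.dropWhile (fun l => !pvIsHeader l))
          (ids.foldl (fun a sid =>
            let data := PySem.Dict.ofList (d.getD sid [])
            let a := if data.getD "comment" "" ≠ "" then a ++ [data.getD "comment" ""] else a
            a ++ [sid ++ " = " ++ data.getD "image" ""] ++ [""]) (acc ++ [line]))
      else if sec == "LGP::CELL_COLOR" then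
        rebuild_ini_loopA ids d (tl.dropWhile (fun l => !pvIsHeader l))
          (ids.foldl (fun a sid =>
            let data := PySem.Dict.ofList (d.getD sid [])
            if data.getD "color" "" ≠ "" then
              let a := if data.getD "comment" "" ≠ "" then a ++ [data.getD "comment" ""] else a
              a ++ [sid ++ "=" ++ data.getD "color" ""] ++ [""]
            else a) (acc ++ [line]))
      else rebuild_ini_loopA ids d tl (acc ++ [line])
    else rebuild_ini_loopA ids d tl (acc ++ [line])
  termination_by rest _ => rest.length
  decreasing_by
    · exact Nat.lt_succ_of_le (List.length_dropWhile_le _ _)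
    · exact Nat.lt_succ_of_le (List.length_dropWhile_le _ _)
    · exact Nat.lt_succ_of_le (Nat.le_refl _)
    · exact Nat.lt_succ_of_le (Nat.le_refl _)

def rebuild_ini (lines : List String) (skills : List (String × List (String × String))) : String :=
  let d := PySem.Dict.ofList skills
  let skill_ids := PySem.List.sorted d.keys (fun x => x) false
  PySem.Str.join "\n" (rebuild_ini_loopA skill_ids d lines []) ++ "\n"

-- ===== PORT B =====
def pvImageLines (ids : List String) (d : PySem.Dict String (List (String × String))) : List String :=
  ids.flatMap (fun sid =>
    let data := PySem.Dict.ofList (d.getD sid [])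
    (if data.getD "comment" "" ≠ "" then [data.getD "comment" ""] else []) ++
      [sid ++ " = " ++ data.getD "image" ""] ++ [""])

def pvColorLines (ids : List String) (d : PySem.Dict String (List (String × String))) : List String :=
  ids.flatMap (fun sid =>
    let data := PySem.Dict.ofList (d.getD sid [])
    if data.getD "color" "" ≠ "" then
      (if data.getD "comment" "" ≠ "" then [data.getD "comment" ""] else []) ++
        [sid ++ "=" ++ data.getD "color" ""] ++ [""]
    else [])

-- phase 1: the (header_line, section_name, body_lines) groups of the tail after the preamble
def pvGroups : List String → List (String × String × List String)
  | [] => []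
  | h :: tl =>
    (h, PySem.Str.slice (PySem.Str.strip h) (some 1) (some (-1)), tl.takeWhile (fun l => !pvIsHeader l))
      :: pvGroups (tl.dropWhile (fun l => !pvIsHeader l))
  termination_by ls => ls.length
  decreasing_by exact Nat.lt_succ_of_le (List.length_dropWhile_le _ _)

def rebuild_ini_alt (lines : List String) (skills : List (String × List (String × String))) : String :=
  let d := PySem.Dict.ofList skills
  let skill_ids := PySem.List.sorted d.keys (fun x => x) false
  let preamble := lines.takeWhile (fun l => !pvIsHeader l)
  let gs := pvGroups (lines.dropWhile (fun l => !pvIsHeader l))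
  -- phase 2: assemble
  let new_lines := preamble ++ gs.flatMap (fun g =>
    g.1 :: (if g.2.1 == "LGP::CELL_IMAGE" then pvImageLines skill_ids d
            else if g.2.1 == "LGP::CELL_COLOR" then pvColorLines skill_ids d
            else g.2.2))
  PySem.Str.join "\n" new_lines ++ "\n"

-- ===== PRECONDITION & SPEC =====
-- Pre_ excludes exactly the inputs on which Python A raises KeyError: a "[LGP::CELL_IMAGE]"
-- (resp. "[LGP::CELL_COLOR]") header present in `lines` while some skill dict lacks the
-- "comment"/"image" (resp. "color", or "comment" when its color is non-empty) key.
def Pre_rebuild_ini (lines : List String) (skills : List (String × List (String × String))) : Prop :=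
  (lines.any (fun l => pvIsHeader l &&
      PySem.Str.slice (PySem.Str.strip l) (some 1) (some (-1)) == "LGP::CELL_IMAGE") = true →
    ∀ p ∈ (PySem.Dict.ofList skills).items,
      (PySem.Dict.ofList p.2).contains "comment" = true ∧ (PySem.Dict.ofList p.2).contains "image" = true) ∧
  (lines.any (fun l => pvIsHeader l &&
      PySem.Str.slice (PySem.Str.strip l) (some 1) (some (-1)) == "LGP::CELL_COLOR") = true →
    ∀ p ∈ (PySem.Dict.ofList skills).items,
      (PySem.Dict.ofList p.2).contains "color" = true ∧
      ((PySem.Dict.ofList p.2).getD "color" "" ≠ "" → (PySem.Dict.ofList p.2).contains "comment" = true))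
instance (lines : List String) (skills : List (String × List (String × String))) : Decidable (Pre_rebuild_ini lines skills) := by unfold Pre_rebuild_ini; infer_instance

def pvWitness_rebuild_ini : List String × (List (String × List (String × String))) :=
  (["; top", "[LGP::CELL_IMAGE]", "old = x", "[misc]", "keep"],
   [("a", [("comment", "; A"), ("image", "a.png"), ("color", "red")]),
    ("b", [("comment", ""), ("image", "b.png"), ("color", "")])])

def Spec_rebuild_ini (lines : List String) (skills : List (String × List (String × String))) (out : String) : Prop := out = rebuild_ini_alt lines skills
instance (lines : List String) (skills : List (String × List (String × String))) (out : String) : Decidable (Spec_rebuild_ini lines skills out) := by unfold Spec_rebuild_ini; infer_instance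

-- ===== CLAIM (what is proved, stated in full; the proofs are below) =====
def Claim_equal_rebuild_ini : Prop := ∀ (lines : List String) (skills : List (String × List (String × String))), Dom_rebuild_ini lines skills → Pre_rebuild_ini lines skills → Spec_rebuild_ini lines skills (rebuild_ini lines skills)

-- ===== LEMMAS AND PROOFS =====

theorem takeWhile_dropWhile_self {α : Type} (p : α → Bool) (l : List α) :
    (l.dropWhile p).takeWhile p = [] := by
  induction l with
  | nil => simp
  | cons x xs ih =>
    by_cases h : p x = true
    · simpa [List.dropWhile_cons, h] using ih
    · simp [h, List.takeWhile_cons]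

theorem dropWhile_dropWhile_self {α : Type} (p : α → Bool) (l : List α) :
    (l.dropWhile p).dropWhile p = l.dropWhile p := by
  induction l with
  | nil => simp
  | cons x xs ih =>
    by_cases h : p x = true
    · simpa [List.dropWhile_cons, h] using ih
    · simp [h]

-- A's image for-loop appends exactly pvImageLines to its initial accumulator
theorem foldl_imageBlock (ids : List String) (d : PySem.Dict String (List (String × String)))
    (init : List String) :
    ids.foldl (fun a sid =>
      let data := PySem.Dict.ofList (d.getD sid [])
      let a := if data.getD "comment" "" ≠ "" then a ++ [data.getD "comment" ""] else a
      a ++ [sid ++ " = " ++ data.getD "image" ""] ++ [""]) init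
    = init ++ pvImageLines ids d := by
  induction ids generalizing init with
  | nil => simp [pvImageLines]
  | cons sid rest ih =>
    simp only [List.foldl_cons, pvImageLines, List.flatMap_cons] at *
    rw [ih]
    by_cases h : (PySem.Dict.ofList (d.getD sid [])).getD "comment" "" ≠ "" <;> simp [h]

-- A's color for-loop appends exactly pvColorLines
theorem foldl_colorBlock (ids : List String) (d : PySem.Dict String (List (String × String)))
    (init : List String) :
    ids.foldl (fun a sid =>
      let data := PySem.Dict.ofList (d.getD sid [])
      if data.getD "color" "" ≠ "" then
        let a := if data.getD "comment" "" ≠ "" then a ++ [data.getD "comment" ""] else a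
        a ++ [sid ++ "=" ++ data.getD "color" ""] ++ [""]
      else a) init
    = init ++ pvColorLines ids d := by
  induction ids generalizing init with
  | nil => simp [pvColorLines]
  | cons sid rest ih =>
    simp only [List.foldl_cons, pvColorLines, List.flatMap_cons] at *
    rw [ih]
    by_cases hc : (PySem.Dict.ofList (d.getD sid [])).getD "color" "" ≠ ""
    · by_cases h : (PySem.Dict.ofList (d.getD sid [])).getD "comment" "" ≠ "" <;> simp [hc, h]
    · simp [hc]

-- B's rendering of a tail of lines
def pvRender (ids : List String) (d : PySem.Dict String (List (String × String)))
    (rest : List String) : List String :=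
  rest.takeWhile (fun l => !pvIsHeader l) ++
    (pvGroups (rest.dropWhile (fun l => !pvIsHeader l))).flatMap (fun g =>
      g.1 :: (if g.2.1 == "LGP::CELL_IMAGE" then pvImageLines ids d
              else if g.2.1 == "LGP::CELL_COLOR" then pvColorLines ids d
              else g.2.2))

theorem loopA_eq_render (ids : List String) (d : PySem.Dict String (List (String × String))) :
    ∀ (n : Nat) (rest acc : List String), rest.length ≤ n →
      rebuild_ini_loopA ids d rest acc = acc ++ pvRender ids d rest := by
  intro n
  induction n with
  | zero =>
    intro rest acc h
    have : rest = [] := List.eq_nil_of_length_eq_zero (Nat.le_zero.mp h)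
    subst this
    simp [rebuild_ini_loopA, pvRender, pvGroups]
  | succ n ih =>
    intro rest acc h
    match rest with
    | [] => simp [rebuild_ini_loopA, pvRender, pvGroups]
    | line :: tl =>
      have hlen : tl.length ≤ n := Nat.le_of_succ_le_succ h
      have hdlen : (tl.dropWhile (fun l => !pvIsHeader l)).length ≤ n :=
        Nat.le_trans (List.length_dropWhile_le _ _) hlen
      by_cases hh : pvIsHeader line = true
      · have hh' : (PySem.Str.startswith (PySem.Str.strip line) "[" &&
            PySem.Str.endswith (PySem.Str.strip line) "]") = true := hh
        by_cases himg : (PySem.Str.slice (PySem.Str.strip line) (some 1) (some (-1)) == "LGP::CELL_IMAGE") = true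
        · simp only [rebuild_ini_loopA]
          rw [if_pos hh', if_pos himg, foldl_imageBlock, ih _ _ hdlen]
          conv_rhs => rw [pvRender]
          rw [List.takeWhile_cons_of_neg (by simp [hh]),
              List.dropWhile_cons_of_neg (by simp [hh]), pvGroups]
          simp only [List.flatMap_cons, himg, if_true]
          rw [pvRender, takeWhile_dropWhile_self, dropWhile_dropWhile_self]
          simp
        · by_cases hcol : (PySem.Str.slice (PySem.Str.strip line) (some 1) (some (-1)) == "LGP::CELL_COLOR") = true
          · simp only [rebuild_ini_loopA]
            rw [if_pos hh', if_neg himg, if_pos hcol, foldl_colorBlock, ih _ _ hdlen]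
            conv_rhs => rw [pvRender]
            rw [List.takeWhile_cons_of_neg (by simp [hh]),
                List.dropWhile_cons_of_neg (by simp [hh]), pvGroups]
            simp only [List.flatMap_cons, himg, hcol, if_true]
            rw [pvRender, takeWhile_dropWhile_self, dropWhile_dropWhile_self]
            simp
          · simp only [rebuild_ini_loopA]
            rw [if_pos hh', if_neg himg, if_neg hcol, ih _ _ hlen]
            conv_rhs => rw [pvRender]
            rw [List.takeWhile_cons_of_neg (by simp [hh]),
                List.dropWhile_cons_of_neg (by simp [hh]), pvGroups]
            simp only [List.flatMap_cons, himg, hcol]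
            rw [pvRender]
            simp
      · have hh' : ¬ ((PySem.Str.startswith (PySem.Str.strip line) "[" &&
            PySem.Str.endswith (PySem.Str.strip line) "]") = true) := by
          simpa [pvIsHeader] using hh
        simp only [rebuild_ini_loopA]
        rw [if_neg hh', ih _ _ hlen]
        conv_rhs => rw [pvRender]
        rw [List.takeWhile_cons_of_pos (by simp only [Bool.not_eq_true] at hh; simp [hh]),
            List.dropWhile_cons_of_pos (by simp only [Bool.not_eq_true] at hh; simp [hh])]
        rw [pvRender]
        simp

-- ===== VERDICT (by name: the statement is the Claim_ definition above) =====
theorem rebuild_ini_spec : Claim_equal_rebuild_ini := by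
  intro lines skills _ _
  show rebuild_ini lines skills = rebuild_ini_alt lines skills
  simp only [rebuild_ini, rebuild_ini_alt,
    loopA_eq_render _ _ lines.length lines [] (Nat.le_refl _), pvRender, List.nil_append]
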